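-- pv_equiv track=rewrite | github.com/CodelineAtyab/OrbitXO | examples/from_haya/The Alphabet Alchemist by haya/converter.py | get_package_value
-- ===== SOURCE A (Python) =====
-- def char_to_value(c):
--     """Convert character to numeric value (a=1,...,z=26, _=0)"""
--     return 0 if c == '_' else ord(c) - ord('a') + 1
--
-- def get_next_element(s, index):
--     """Get next element considering z rule"""
--     if s[index] != 'z':
--         return s[index], index + 1
--     # z rule: take z(s) + next char
--     start = index
--     while index < len(s) and s[index] == 'z':
--         index += 1
--     if index < len(s):
--         index += 1  # include next char after z sequence
--     return s[start:index], index
--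
-- def get_package_value(s, count):
--     """Get package value summing exactly 'count' values (not just elements)"""
--     value = 0
--     idx = 0
--     values_taken = 0
--
--     while values_taken < count and idx < len(s):
--         elem, next_idx = get_next_element(s, idx)
--         elem_value = sum(char_to_value(ch) for ch in elem)
--         value += elem_value
--         idx = next_idx
--         values_taken += 1  # عد القيم بدقة
--     return value, s[idx:]
-- ===== SOURCE B (Python) =====
-- def _char_value(c):
--     return 0 if c == '_' else ord(c) - 96
--
-- def _tokenize(s):
--     """One pass: split s into elements (single non-z char, or a maximal z-run
--     plus the following char, or the terminal z-run)."""
--     toks = []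
--     i, n = 0, len(s)
--     while i < n:
--         if s[i] != 'z':
--             toks.append(s[i])
--             i += 1
--         else:
--             j = i + 1
--             while j < n and s[j] == 'z':
--                 j += 1
--             if j < n:
--                 j += 1
--             toks.append(s[i:j])
--             i = j
--     return toks
--
-- def get_package_value(s, count):
--     toks = _tokenize(s)
--     taken = toks[:count] if count > 0 else []
--     total = sum(_char_value(ch) for t in taken for ch in t)
--     L = sum(len(t) for t in taken)
--     return total, s[L:]
-- ===== Notes on version B (the rewrite author's own statement) =====
-- stated objective: alternative
-- what changed: B first tokenizes the whole string into z-rule elements in one pass, then takes the first 'count' tokens, sums their character values, and cuts the suffix at the combined length, instead of A's interleaved consume-and-sum while loop over an index.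
import Mathlib
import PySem

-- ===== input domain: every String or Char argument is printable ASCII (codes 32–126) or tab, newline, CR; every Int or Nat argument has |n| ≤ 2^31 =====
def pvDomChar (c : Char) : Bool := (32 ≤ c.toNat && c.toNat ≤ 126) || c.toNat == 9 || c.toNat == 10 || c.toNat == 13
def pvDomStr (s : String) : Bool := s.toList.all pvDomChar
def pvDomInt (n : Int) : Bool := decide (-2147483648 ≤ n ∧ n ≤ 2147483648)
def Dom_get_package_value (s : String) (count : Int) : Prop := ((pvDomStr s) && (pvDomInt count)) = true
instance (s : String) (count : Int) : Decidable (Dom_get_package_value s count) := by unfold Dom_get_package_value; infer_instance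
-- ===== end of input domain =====

-- B tokenizes the string into z-rule elements first, then sums over the first `count` tokens and cuts the suffix at their combined length (alternative decomposition; same cost).


-- ===== PORT A =====
def char_to_value (c : Char) : Int :=
  if c = '_' then 0 else (c.toNat : Int) - 97 + 1

-- the inner `while index < len(s) and s[index] == 'z'` loop of get_next_element
def zrun (s : List Char) (index : Nat) : Nat :=
  if index < s.length ∧ s.getD index ' ' = 'z' then zrun s (index + 1) else index
termination_by s.length - index
decreasing_by omega

def get_next_element (s : List Char) (index : Nat) : List Char × Nat :=
  if s.getD index ' ' ≠ 'z' then ([s.getD index ' '], index + 1)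
  else if zrun s index < s.length then
    ((s.drop index).take (zrun s index + 1 - index), zrun s index + 1)
  else   -- s[start:index] slices: indices stay in range
    ((s.drop index).take (zrun s index - index), zrun s index)

def loopA (s : List Char) (count value : Int) (idx : Nat) (values_taken : Int) : Int × Nat :=
  if h : values_taken < count ∧ idx < s.length then
    let p := get_next_element s idx
    let elem_value := (p.1.map char_to_value).sum
    loopA s count (value + elem_value) p.2 (values_taken + 1)
  else (value, idx)
termination_by (count - values_taken).toNat
decreasing_by omega

def get_package_value (s : String) (count : Int) : Int × String :=
  let r := loopA s.toList count 0 0 0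
  (r.1, String.mk (s.toList.drop r.2))   -- s[idx:] with 0 ≤ idx ≤ len s

-- ===== PORT B =====
def char_value_b (c : Char) : Int :=
  if c = '_' then 0 else (c.toNat : Int) - 96

-- one pass over the characters, producing the list of z-rule elements
def tokB : List Char → List (List Char)
  | [] => []
  | c :: rest =>
    if c = 'z' then
      let zs := rest.takeWhile (fun x => x = 'z')
      if zs.length < rest.length then
        (c :: (zs ++ [rest.getD zs.length ' '])) :: tokB (rest.drop (zs.length + 1))
      else [c :: zs]                               -- terminal z-run
    else [c] :: tokB rest
termination_by s => s.length
decreasing_by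
  · simp
  · simp

def get_package_value_alt (s : String) (count : Int) : Int × String :=
  let toks := tokB s.toList
  let taken := if 0 < count then toks.take count.toNat else []
  let total := (taken.map (fun t => (t.map char_value_b).sum)).sum
  let L := (taken.map List.length).sum
  (total, String.mk (s.toList.drop L))

-- ===== PRECONDITION & SPEC =====
def Spec_get_package_value (s : String) (count : Int) (out : Int × String) : Prop := out = get_package_value_alt s count
instance (s : String) (count : Int) (out : Int × String) : Decidable (Spec_get_package_value s count out) := by unfold Spec_get_package_value; infer_instance

-- ===== CLAIM (what is proved, stated in full; the proofs are below) =====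
def Claim_equal_get_package_value : Prop := ∀ (s : String) (count : Int), Dom_get_package_value s count → Spec_get_package_value s count (get_package_value s count)

-- ===== LEMMAS AND PROOFS =====

theorem char_value_eq (c : Char) : char_to_value c = char_value_b c := by
  unfold char_to_value char_value_b; split <;> omega

theorem takeWhile_take (l : List Char) (p : Char → Bool) :
    l.takeWhile p = l.take (l.takeWhile p).length := by
  induction l with
  | nil => simp
  | cons c t ih => by_cases h : p c <;> simp [List.takeWhile, h, ih.symm]

theorem zrun_eq (s : List Char) (idx : Nat) :
    zrun s idx = idx + ((s.drop idx).takeWhile (fun x => x = 'z')).length := by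
  generalize hm : s.length - idx = m
  induction m generalizing idx with
  | zero =>
    have hd : s.drop idx = [] := List.drop_eq_nil_of_le (by omega)
    rw [zrun, hd]
    simp
    omega
  | succ n ih =>
    have hlt : idx < s.length := by omega
    have hd : s.drop idx = s[idx] :: s.drop (idx + 1) := List.drop_eq_getElem_cons hlt
    have hg : s.getD idx ' ' = s[idx] := List.getD_eq_getElem s ' ' hlt
    by_cases hz : s[idx] = 'z'
    · rw [zrun]
      simp only [hg, hz, hlt, and_true, if_pos]
      rw [ih (idx + 1) (by omega), hd]
      simp [hz]
      omega
    · rw [zrun, hd]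
      simp only [List.getD] at hg
      simp [hg, hz]

theorem tokB_nz (c : Char) (rest : List Char) (h : ¬ c = 'z') :
    tokB (c :: rest) = [c] :: tokB rest := by
  rw [tokB.eq_def]; simp [h]

theorem tokB_z_lt (rest : List Char)
    (h : ((rest.takeWhile (fun x => x = 'z')).length) < rest.length) :
    tokB ('z' :: rest) =
      ('z' :: (rest.takeWhile (fun x => x = 'z')
          ++ [rest.getD (rest.takeWhile (fun x => x = 'z')).length ' ']))
        :: tokB (rest.drop ((rest.takeWhile (fun x => x = 'z')).length + 1)) := by
  rw [tokB.eq_def]; simp [h]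

theorem tokB_z_ge (rest : List Char)
    (h : ¬ ((rest.takeWhile (fun x => x = 'z')).length) < rest.length) :
    tokB ('z' :: rest) = ['z' :: rest.takeWhile (fun x => x = 'z')] := by
  rw [tokB.eq_def]; simp [h]

theorem getD_of_drop (l : List Char) (n : Nat) (d x : Char) (t : List Char)
    (h : l.drop n = d :: t) : l.getD n x = d := by
  have hn : n < l.length := by
    by_contra hc
    rw [List.drop_eq_nil_of_le (by omega)] at h; cases h
  rw [List.getD_eq_getElem l x hn]
  have h2 := (List.drop_eq_getElem_cons (l := l) (i := n) hn).symm.trans h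
  injection h2

theorem step_lemma (s : List Char) (idx : Nat) (h : idx < s.length) :
    tokB (s.drop idx) = (get_next_element s idx).1 :: tokB (s.drop (get_next_element s idx).2)
    ∧ (get_next_element s idx).2 = idx + (get_next_element s idx).1.length
    ∧ (get_next_element s idx).2 ≤ s.length := by
  have hd : s.drop idx = s[idx] :: s.drop (idx + 1) := List.drop_eq_getElem_cons h
  have hg : s.getD idx ' ' = s[idx] := List.getD_eq_getElem s ' ' h
  by_cases hz : s[idx] = 'z'
  · -- z-rule element
    have hzl1 : 1 ≤ ((s.drop idx).takeWhile (fun x => x = 'z')).length := by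
      rw [hd]; simp [List.takeWhile, hz]
    have hzlle : ((s.drop idx).takeWhile (fun x => x = 'z')).length ≤ (s.drop idx).length :=
      (List.takeWhile_sublist (l := s.drop idx) (p := fun x => x = 'z')).length_le
    set zl := ((s.drop idx).takeWhile (fun x => x = 'z')).length with hzl
    have hzr : zrun s idx = idx + zl := zrun_eq s idx
    have htw : (s.drop idx).takeWhile (fun x => x = 'z') = (s.drop idx).take zl :=
      takeWhile_take (s.drop idx) _
    have hcz : (s.drop idx).takeWhile (fun x => x = 'z') =
        s[idx] :: (s.drop (idx + 1)).takeWhile (fun x => x = 'z') := by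
      rw [hd]; simp [List.takeWhile, hz]
    have hzs : ((s.drop (idx + 1)).takeWhile (fun x => x = 'z')).length = zl - 1 := by
      rw [hzl, hcz]; simp
    have hdz : (s.drop (idx + 1)).drop (zl - 1) = s.drop (idx + zl) := by
      rw [List.drop_drop]; congr 1; omega
    have hlen : (s.drop idx).length = s.length - idx := List.length_drop
    have hlen2 : (s.drop (idx + 1)).length = s.length - (idx + 1) := List.length_drop
    rw [get_next_element, if_neg (by simp [List.getD, List.getElem?_eq_getElem h, hz]), hzr]
    by_cases hi : idx + zl < s.length
    · -- a char follows the z-run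
      rw [if_pos hi]
      have hdi : s.drop (idx + zl) = s[idx + zl] :: s.drop (idx + zl + 1) :=
        List.drop_eq_getElem_cons hi
      have hdd : List.take 1 (List.drop zl (List.drop idx s)) = [s[idx + zl]] := by
        rw [List.drop_drop, hdi]
        simp only [List.take_succ_cons, List.take_zero]
      have htake : (s.drop idx).take (idx + zl + 1 - idx) =
          ((s.drop idx).takeWhile (fun x => x = 'z')) ++ [s[idx + zl]] := by
        have h1 : idx + zl + 1 - idx = zl + 1 := by omega
        rw [h1, List.take_add, ← htw, hdd]
      have hcond : ((s.drop (idx + 1)).takeWhile (fun x => x = 'z')).length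
          < (s.drop (idx + 1)).length := by rw [hzs]; omega
      have hgd : (s.drop (idx + 1)).getD (zl - 1) ' ' = s[idx + zl] :=
        getD_of_drop _ _ _ _ _ (by rw [hdz, hdi])
      dsimp only
      refine ⟨?_, ?_, by omega⟩
      · rw [htake, hcz, hd, hz, tokB_z_lt _ hcond, hzs, hgd]
        congr 2
        rw [List.drop_drop]
        congr 1
        omega
      · rw [htake]
        simp only [List.length_append, List.length_cons, List.length_nil]
        rw [← hzl]
        omega
    · -- the z-run ends the string
      rw [if_neg hi]
      have hzeq : zl = s.length - idx := by omega
      have hdrop0 : s.drop (idx + zl) = [] := List.drop_eq_nil_of_le (by omega)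
      have hcond : ¬ (((s.drop (idx + 1)).takeWhile (fun x => x = 'z')).length
          < (s.drop (idx + 1)).length) := by rw [hzs]; omega
      have htake : (s.drop idx).take (idx + zl - idx) =
          (s.drop idx).takeWhile (fun x => x = 'z') := by
        have : idx + zl - idx = zl := by omega
        rw [this, ← htw]
      dsimp only
      refine ⟨?_, ?_, by omega⟩
      · rw [htake, hcz, hd, hz, tokB_z_ge _ hcond, hdrop0]
        simp [tokB]
      · rw [htake]

  · -- single non-z character
    rw [get_next_element, if_pos (by simp [List.getD, List.getElem?_eq_getElem h, hz]), hg]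
    dsimp only
    refine ⟨?_, by simp, by omega⟩
    rw [hd, tokB_nz _ _ hz]

theorem loop_aux (s : List Char) (count : Int) (m : Nat) :
    ∀ (value : Int) (idx : Nat) (vt : Int), idx ≤ s.length → (count - vt).toNat = m →
    loopA s count value idx vt =
      (value + (((tokB (s.drop idx)).take (count - vt).toNat).map
          (fun t => (t.map char_to_value).sum)).sum,
       idx + (((tokB (s.drop idx)).take (count - vt).toNat).map List.length).sum) := by
  induction m with
  | zero =>
    intro value idx vt h hm
    rw [loopA, dif_neg (by omega), hm]
    simp
  | succ n ih =>
    intro value idx vt h hm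
    have hvc : vt < count := by omega
    by_cases hidx : idx < s.length
    · rw [loopA, dif_pos ⟨hvc, hidx⟩]
      dsimp only
      obtain ⟨h1, h2, h3⟩ := step_lemma s idx hidx
      rw [ih _ _ (vt + 1) h3 (by omega), hm, h1, List.take_succ_cons]
      have hn : (count - (vt + 1)).toNat = n := by omega
      rw [hn]
      simp only [List.map_cons, List.sum_cons, Prod.mk.injEq]
      constructor
      · omega
      · omega
    · rw [loopA, dif_neg (by omega)]
      have hnil : s.drop idx = [] := List.drop_eq_nil_of_le (by omega)
      rw [hm, hnil]
      simp [tokB]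

theorem loop_eq (s : List Char) (count value : Int) (idx : Nat) (vt : Int)
    (h : idx ≤ s.length) :
    loopA s count value idx vt =
      (value + (((tokB (s.drop idx)).take (count - vt).toNat).map
          (fun t => (t.map char_to_value).sum)).sum,
       idx + (((tokB (s.drop idx)).take (count - vt).toNat).map List.length).sum) :=
  loop_aux s count ((count - vt).toNat) value idx vt h rfl

theorem get_package_value_spec : Claim_equal_get_package_value := by
  unfold Claim_equal_get_package_value
  intro s count _
  unfold Spec_get_package_value get_package_value get_package_value_alt
  rw [loop_eq s.toList count 0 0 0 (Nat.zero_le _)]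
  dsimp only
  rw [List.drop_zero, Int.sub_zero]
  have hif : (if 0 < count then (tokB s.toList).take count.toNat else [])
      = (tokB s.toList).take count.toNat := by
    split
    · rfl
    · have h0 : count.toNat = 0 := by omega
      rw [h0]
      simp
  rw [hif]
  have hfun : (fun t : List Char => (t.map char_to_value).sum)
      = (fun t => (t.map char_value_b).sum) := by
    funext t
    exact congrArg List.sum (List.map_congr_left (fun c _ => char_value_eq c))
  rw [hfun]
  simp
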